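-- pv_equiv track=rewrite | github.com/JiMMyMatrix/ext | orchestration/harness/start_guard.py | scopes_overlap
-- ===== SOURCE A (Python) =====
-- from typing import Any, Dict, List, Optional
--
-- def scopes_overlap(left: List[str], right: List[str]) -> bool:
--     for candidate in left:
--         for active in right:
--             if not candidate or not active:
--                 continue
--             if candidate == active:
--                 return True
--             if candidate.startswith(active + "/") or active.startswith(candidate + "/"):
--                 return True
--     return False
-- ===== SOURCE B (Python) =====
-- def scopes_overlap(left, right):
--     # Index the right-hand scopes once: the scopes themselves and every
--     # '/'-cut prefix of them; then each left scope is answered by set lookups.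
--     rset = {a for a in right if a}
--     rpref = {a[:i] for a in right for i in range(len(a)) if a[i] == "/"}
--     for c in left:
--         if c and (c in rset or c in rpref
--                   or any(c[:i] in rset for i in range(len(c)) if c[i] == "/")):
--             return True
--     return False
-- ===== Notes on version B (the rewrite author's own statement) =====
-- stated objective: alternative
-- what changed: Replaces A's nested pairwise scan with one indexing pass over `right` (a set of its non-empty scopes and a set of all their '/'-cut prefixes) so each left scope is decided by set lookups of itself and its own '/'-cut prefixes; asymptotically better in the worst case, but A's early exit can win when an overlap occurs early, so no speed claim.
import Mathlib
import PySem

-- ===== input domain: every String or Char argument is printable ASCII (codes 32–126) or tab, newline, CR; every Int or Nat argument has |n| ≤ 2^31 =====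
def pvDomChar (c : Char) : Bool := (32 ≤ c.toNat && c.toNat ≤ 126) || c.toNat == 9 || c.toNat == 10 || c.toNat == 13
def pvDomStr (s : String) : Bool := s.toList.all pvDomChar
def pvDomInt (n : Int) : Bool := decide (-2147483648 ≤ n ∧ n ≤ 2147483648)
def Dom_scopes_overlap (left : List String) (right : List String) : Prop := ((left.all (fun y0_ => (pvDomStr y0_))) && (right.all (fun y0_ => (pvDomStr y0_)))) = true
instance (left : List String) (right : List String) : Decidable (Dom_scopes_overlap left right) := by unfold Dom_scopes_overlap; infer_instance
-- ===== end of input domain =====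

-- B replaces A's pairwise scan by one preindexing pass over `right` (a set of its scopes and a set
-- of their '/'-cut prefixes) plus set lookups per left scope (alternative algorithm).

-- ===== PORT A =====
-- Nested for-loops with early `return True` = nested `any`; `continue` = false branch.
-- Python string equality / emptiness are compared via .toList (equivalent on String).
def scopes_overlap (left : List String) (right : List String) : Bool :=
  left.any (fun candidate => right.any (fun active =>
    if candidate.toList.isEmpty || active.toList.isEmpty then false
    else if candidate.toList = active.toList then true
    else PySem.Chars.startswith candidate.toList (active.toList ++ ['/']) ||
         PySem.Chars.startswith active.toList (candidate.toList ++ ['/'])))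

-- ===== PORT B =====
-- B-side helper: transliterates the comprehension "s[:i] for i in range(len(s)) if s[i] == '/'"
-- (the '/'-cut prefixes of s, in order), structurally over the character list.
def slashCuts : List Char → List (List Char)
  | [] => []
  | ch :: rest => (if ch = '/' then [([] : List Char)] else []) ++ (slashCuts rest).map (ch :: ·)

def scopes_overlap_alt (left : List String) (right : List String) : Bool :=
  let rset : PySem.Set (List Char) :=
    PySem.Set.ofList ((right.filter (fun a => !a.toList.isEmpty)).map String.toList)
  let rpref : PySem.Set (List Char) :=
    PySem.Set.ofList (right.flatMap (fun a => slashCuts a.toList))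
  left.any (fun c =>
    !c.toList.isEmpty &&
      (PySem.Set.contains rset c.toList || PySem.Set.contains rpref c.toList ||
        (slashCuts c.toList).any (fun p => PySem.Set.contains rset p)))

-- ===== PRECONDITION & SPEC =====
def Spec_scopes_overlap (left : List String) (right : List String) (out : Bool) : Prop := out = scopes_overlap_alt left right
instance (left : List String) (right : List String) (out : Bool) : Decidable (Spec_scopes_overlap left right out) := by unfold Spec_scopes_overlap; infer_instance

-- ===== CLAIM (what is proved, stated in full; the proofs are below) =====
def Claim_equal_scopes_overlap : Prop := ∀ (left : List String) (right : List String), Dom_scopes_overlap left right → Spec_scopes_overlap left right (scopes_overlap left right)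

-- ===== LEMMAS AND PROOFS =====

-- `slashCuts` characterisation: p is a '/'-cut prefix of c iff p ++ "/" is a prefix of c.
theorem mem_slashCuts (c p : List Char) : p ∈ slashCuts c ↔ p ++ ['/'] <+: c := by
  induction c generalizing p with
  | nil => simp [slashCuts]
  | cons ch rest ih =>
    cases p with
    | nil => by_cases h : ch = '/' <;> simp [slashCuts, h, List.cons_prefix_cons, eq_comm]
    | cons x p' =>
      by_cases h : ch = '/' <;> simp [slashCuts, h, List.cons_prefix_cons, ih] <;> aesop


-- The common meaning of one pair: both nonempty and equal-or-path-prefix (stated on char lists).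
def PairRel (c a : List Char) : Prop :=
  c ≠ [] ∧ a ≠ [] ∧ (c = a ∨ a ++ ['/'] <+: c ∨ c ++ ['/'] <+: a)

theorem scopes_overlap_iff (left right : List String) :
    scopes_overlap left right = true ↔
      ∃ c ∈ left, ∃ a ∈ right, PairRel c.toList a.toList := by
  unfold scopes_overlap
  simp only [List.any_eq_true]
  refine exists_congr fun c => and_congr_right fun _ =>
    exists_congr fun a => and_congr_right fun _ => ?_
  by_cases hc : c.toList = [] <;> by_cases ha : a.toList = [] <;>
    by_cases he : c.toList = a.toList <;>
      simp [PairRel, hc, ha, he, List.isEmpty_iff, PySem.Chars.startswith_iff]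

theorem scopes_overlap_alt_iff (left right : List String) :
    scopes_overlap_alt left right = true ↔
      ∃ c ∈ left, ∃ a ∈ right, PairRel c.toList a.toList := by
  unfold scopes_overlap_alt PairRel
  simp only [List.any_eq_true, Bool.and_eq_true, Bool.or_eq_true, Bool.not_eq_true',
    List.isEmpty_eq_false_iff, PySem.Set.contains_iff, PySem.Set.mem_ofList, List.mem_map,
    List.mem_filter, List.mem_flatMap, mem_slashCuts]
  constructor
  · rintro ⟨c, hcl, hc, (⟨a, ⟨har, hane⟩, hac⟩ | ⟨a, har, hpre⟩) | ⟨p, hp, a, ⟨har, hane⟩, rfl⟩⟩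
    · exact ⟨c, hcl, a, har, hc, hane, Or.inl hac.symm⟩
    · refine ⟨c, hcl, a, har, hc, fun h => ?_, Or.inr (Or.inr hpre)⟩
      rw [h] at hpre; simpa using hpre.length_le
    · exact ⟨c, hcl, a, har, hc, hane, Or.inr (Or.inl hp)⟩
  · rintro ⟨c, hcl, a, har, hc, ha, (heq | hp | hp)⟩
    · exact ⟨c, hcl, hc, Or.inl (Or.inl ⟨a, ⟨har, ha⟩, heq.symm⟩)⟩
    · exact ⟨c, hcl, hc, Or.inr ⟨a.toList, hp, a, ⟨har, ha⟩, rfl⟩⟩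
    · exact ⟨c, hcl, hc, Or.inl (Or.inr ⟨a, har, hp⟩)⟩

-- ===== VERDICT (by name: the statement is the Claim_ definition above) =====
theorem scopes_overlap_spec : Claim_equal_scopes_overlap := by
  intro left right _
  unfold Spec_scopes_overlap
  rw [Bool.eq_iff_iff, scopes_overlap_iff, scopes_overlap_alt_iff]
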